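-- pv_equiv track=rewrite | github.com/ahmedbodi/willie-modules | numb.py | string_to_num
-- ===== SOURCE A (Python) =====
-- import string
--
-- def string_to_num(txt):
--     characters = '0123456789' + string.ascii_letters
--     txt = txt.lower().strip()
--     txt = ' '.join(txt.split())
--     word_sums = 0
--     for word in txt.split():
--         word_sum = 0
--         for letter in word:
--             n = characters.index(letter)
--             word_sum += n
--         word_sums += word_sum
--     return word_sums
-- ===== SOURCE B (Python) =====
-- import string
--
-- def string_to_num(txt):
--     # One pass: count non-whitespace characters of the lowercased text,
--     # then aggregate count * alphanumeric-index per distinct character.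
--     characters = '0123456789' + string.ascii_letters
--     counts = {}
--     for ch in txt.lower():
--         if not ch.isspace():
--             counts[ch] = counts.get(ch, 0) + 1
--     return sum(cnt * characters.index(ch) for ch, cnt in counts.items())
-- ===== Notes on version B (the rewrite author's own statement) =====
-- stated objective: idiomatic
-- what changed: B replaces A's strip/join/re-split and nested word-by-word, letter-by-letter summation with a single pass over the lowercased string that builds a per-character count dictionary, then one weighted sum count*index over the distinct characters.
import Mathlib
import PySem

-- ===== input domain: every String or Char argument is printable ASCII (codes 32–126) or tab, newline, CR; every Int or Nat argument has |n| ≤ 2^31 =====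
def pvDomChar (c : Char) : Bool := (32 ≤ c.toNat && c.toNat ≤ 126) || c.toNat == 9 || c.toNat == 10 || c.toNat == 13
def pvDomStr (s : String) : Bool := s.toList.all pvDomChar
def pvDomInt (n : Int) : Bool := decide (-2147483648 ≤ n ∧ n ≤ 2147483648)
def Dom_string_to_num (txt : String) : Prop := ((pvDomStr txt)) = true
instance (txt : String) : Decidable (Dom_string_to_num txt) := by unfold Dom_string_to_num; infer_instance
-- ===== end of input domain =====

-- B replaces A's word-by-word nested scan by a single character pass building a count
-- dictionary and one weighted sum over its distinct characters (objective: idiomatic/alternative).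

-- ===== PORT A =====
def string_to_num (txt : String) : Int :=
  let characters := "0123456789abcdefghijklmnopqrstuvwxyzABCDEFGHIJKLMNOPQRSTUVWXYZ".toList
  let t1 := PySem.Chars.lower txt.toList                              -- txt = txt.lower().strip()
  let t2 := PySem.Chars.strip t1
  let t3 := PySem.Chars.join " ".toList (PySem.Chars.split₀ t2)       -- txt = ' '.join(txt.split())
  (PySem.Chars.split₀ t3).foldl                                       -- for word in txt.split():
    (fun word_sums word =>
      word_sums + word.foldl                                          --   for letter in word:
        (fun word_sum letter =>
          word_sum + (((PySem.List.index? characters letter).getD 0 : Nat) : Int))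
        0)
    0

-- ===== PORT B =====
def string_to_num_alt (txt : String) : Int :=
  let characters := "0123456789abcdefghijklmnopqrstuvwxyzABCDEFGHIJKLMNOPQRSTUVWXYZ".toList
  let counts : PySem.Dict Char Int :=
    (PySem.Chars.lower txt.toList).foldl                              -- for ch in txt.lower():
      (fun d ch => if PySem.Chars.isspace ch then d
                   else d.insert ch (d.getD ch 0 + 1))                --   counts[ch] = counts.get(ch, 0) + 1
      PySem.Dict.empty
  (counts.items.map
    (fun p => p.2 * (((PySem.List.index? characters p.1).getD 0 : Nat) : Int))).sum

-- ===== PRECONDITION & SPEC =====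
-- Pre_ excludes strings containing a character (e.g. punctuation) that is neither
-- alphanumeric nor whitespace: on those A's characters.index raises ValueError.
def Pre_string_to_num (txt : String) : Prop :=
  txt.toList.all (fun c => PySem.Chars.isalnum c || PySem.Chars.isspace c) = true
instance (txt : String) : Decidable (Pre_string_to_num txt) := by unfold Pre_string_to_num; infer_instance
def pvWitness_string_to_num : String := "Abc 123"
def Spec_string_to_num (txt : String) (out : Int) : Prop := out = string_to_num_alt txt
instance (txt : String) (out : Int) : Decidable (Spec_string_to_num txt out) := by unfold Spec_string_to_num; infer_instance

-- ===== CLAIM (what is proved, stated in full; the proofs are below) =====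
def Claim_equal_string_to_num : Prop := ∀ (txt : String), Dom_string_to_num txt → Pre_string_to_num txt → Spec_string_to_num txt (string_to_num txt)

-- ===== LEMMAS AND PROOFS =====

-- the per-character value both programs add up
def pvF (c : Char) : Int :=
  (((PySem.List.index?
      "0123456789abcdefghijklmnopqrstuvwxyzABCDEFGHIJKLMNOPQRSTUVWXYZ".toList c).getD 0 : Nat) : Int)

def pvNS (c : Char) : Bool := !PySem.Chars.isspace c

-- split₀'s accumulator characterisation: the concatenation of the words is the non-space filter
lemma pv_go_flatten : ∀ (s cur : List Char) (acc : List (List Char)),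
    (PySem.Chars.split₀.go s cur acc).flatten
      = acc.reverse.flatten ++ cur.reverse ++ s.filter pvNS := by
  intro s
  induction s with
  | nil =>
      intro cur acc
      simp only [PySem.Chars.split₀.go]
      by_cases h : cur.isEmpty
      · simp_all [List.isEmpty_iff]
      · simp [h, List.flatten_append]
  | cons c rest ih =>
      intro cur acc
      simp only [PySem.Chars.split₀.go]
      by_cases hs : PySem.Chars.isspace c
      · by_cases h : cur.isEmpty
        · simp_all [List.isEmpty_iff, pvNS]
        · simp_all [pvNS]
      · simp [hs, ih, pvNS]

lemma pv_flatten_split₀ (s : List Char) :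
    (PySem.Chars.split₀ s).flatten = s.filter pvNS := by
  unfold PySem.Chars.split₀
  rw [pv_go_flatten]
  simp

lemma pv_filter_dropWhile (s : List Char) :
    (List.dropWhile PySem.Chars.isspace s).filter pvNS = s.filter pvNS := by
  induction s with
  | nil => simp
  | cons c rest ih =>
      by_cases hs : PySem.Chars.isspace c
      · simp [hs, ih, pvNS]
      · simp [hs, pvNS]

lemma pv_filter_strip (s : List Char) :
    (PySem.Chars.strip s).filter pvNS = s.filter pvNS := by
  unfold PySem.Chars.strip PySem.Chars.rstrip PySem.Chars.lstrip
  rw [List.filter_reverse, pv_filter_dropWhile, List.filter_reverse,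
      pv_filter_dropWhile, List.reverse_reverse]

lemma pv_filter_intercalate (parts : List (List Char)) :
    ((" ".toList).intercalate parts).filter pvNS = parts.flatten.filter pvNS := by
  rw [List.intercalate]
  induction parts with
  | nil => simp
  | cons w rest ih =>
      cases rest with
      | nil => simp
      | cons w2 r2 =>
          rw [List.intersperse_cons₂]
          simp only [List.flatten_cons, List.filter_append] at ih ⊢
          rw [ih]
          simp [show (" ".toList).filter pvNS = [] from by decide]
          decide

lemma pv_sum_map_flatten (l : List (List Char)) (f : Char → Int) :
    (l.map (fun w => (w.map f).sum)).sum = (l.flatten.map f).sum := by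
  induction l with
  | nil => rfl
  | cons w rest ih => simp [List.flatten_cons, ih]

-- A computes the sum of pvF over the non-space characters of the lowered text
lemma pv_A_eq (txt : String) :
    string_to_num txt = (((PySem.Chars.lower txt.toList).filter pvNS).map pvF).sum := by
  unfold string_to_num
  simp only []
  have hfn : (fun (word_sums : Int) (word : List Char) =>
      word_sums + word.foldl (fun word_sum letter =>
        word_sum + (((PySem.List.index?
          "0123456789abcdefghijklmnopqrstuvwxyzABCDEFGHIJKLMNOPQRSTUVWXYZ".toList
          letter).getD 0 : Nat) : Int)) 0)
      = fun (word_sums : Int) (word : List Char) => word_sums + (word.map pvF).sum := by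
    funext ws w
    rw [PySem.List.foldl_add w (fun letter =>
      (((PySem.List.index?
        "0123456789abcdefghijklmnopqrstuvwxyzABCDEFGHIJKLMNOPQRSTUVWXYZ".toList
        letter).getD 0 : Nat) : Int)) 0, zero_add]
    rfl
  rw [hfn, PySem.List.foldl_add _ (fun w => (List.map pvF w).sum) 0]
  rw [zero_add, pv_sum_map_flatten, pv_flatten_split₀]
  simp only [PySem.Chars.join]
  rw [pv_filter_intercalate, pv_flatten_split₀, List.filter_filter]
  simp only [pv_filter_strip, Bool.and_self]

-- B's skipping loop is an unconditional counting loop over the filtered list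
lemma pv_B_skip (l : List Char) (d : PySem.Dict Char Int) :
    l.foldl (fun d ch => if PySem.Chars.isspace ch then d else d.insert ch (d.getD ch 0 + 1)) d
      = (l.filter pvNS).foldl (fun d ch => d.insert ch (d.getD ch 0 + 1)) d := by
  induction l generalizing d with
  | nil => rfl
  | cons c rest ih =>
      by_cases hs : PySem.Chars.isspace c
      · simp [hs, pvNS, ih]
      · simp [hs, pvNS, ih]

lemma pv_B_eq (txt : String) :
    string_to_num_alt txt
      = ((PySem.List.dedup ((PySem.Chars.lower txt.toList).filter pvNS)).map
          (fun k => ((((PySem.Chars.lower txt.toList).filter pvNS).count k : Int) * pvF k))).sum := by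
  unfold string_to_num_alt
  simp only []
  rw [pv_B_skip, PySem.Dict.foldl_insert_getD_add_one_eq_counter,
      PySem.Dict.items_counter]
  simp [List.map_map, Function.comp_def, pvF]

-- weighted sum over distinct elements equals the plain sum (Mathlib dedup)
lemma pv_count_sum (L : List Char) (f : Char → Int) :
    (L.map f).sum = (L.dedup.map (fun k => (L.count k : Int) * f k)).sum := by
  rw [Finset.sum_list_map_count, Finset.sum, List.toFinset_val, Multiset.map_coe,
      Multiset.sum_coe]
  simp

lemma pv_dedup_perm (L : List Char) : (PySem.List.dedup L).Perm L.dedup := by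
  apply List.perm_of_nodup_nodup_toFinset_eq (PySem.List.nodup_dedup L) L.nodup_dedup
  ext x
  simp only [List.mem_toFinset, PySem.List.mem_dedup, List.mem_dedup]

-- ===== VERDICT (by name: the statement is the Claim_ definition above) =====
theorem string_to_num_spec : Claim_equal_string_to_num := by
  intro txt _ _
  unfold Spec_string_to_num
  rw [pv_A_eq, pv_B_eq, pv_count_sum]
  exact (((pv_dedup_perm _).map _).sum_eq).symm
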